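-- pv_equiv track=rewrite | github.com/noob-dude27/binary-decimal_converter | decimal-to-binary.py | create_binary
-- ===== SOURCE A (Python) =====
-- def create_binary(alignment: list):
--     """
--     Creates and formats the actual binary using a provided alignment of
--     individual binary digits and numbers.
--     """
--     tmp_list = []
--     for row in alignment:
--         # Removes the numbers.
--         for _ in row:
--             row.pop(0)
--
--         # Appends to a new list and turns them into string.
--         for digit in row:
--             tmp_list.append(digit)
--
--     str1 = ""
--     binary = str1.join(tmp_list)
--
--     return binary
-- ===== SOURCE B (Python) =====
-- def create_binary(alignment: list):
--     """
--     Creates and formats the actual binary using a provided alignment of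
--     individual binary digits and numbers.
--     """
--     # The mutate-while-iterating pop loop in A removes exactly ceil(len(row)/2)
--     # leading elements; do that with one in-place truncation per row.
--     for row in alignment:
--         del row[:(len(row) + 1) // 2]
--     return "".join(e for row in alignment for e in row)
-- ===== Notes on version B (the rewrite author's own statement) =====
-- stated objective: simpler
-- what changed: Replaces A's mutate-while-iterating front-pop loop (which removes ceil(n/2) elements) and the element-by-element tmp_list accumulation with a single in-place slice deletion per row and one join over a flattening generator; both mutate each row the same way.
import Mathlib
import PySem

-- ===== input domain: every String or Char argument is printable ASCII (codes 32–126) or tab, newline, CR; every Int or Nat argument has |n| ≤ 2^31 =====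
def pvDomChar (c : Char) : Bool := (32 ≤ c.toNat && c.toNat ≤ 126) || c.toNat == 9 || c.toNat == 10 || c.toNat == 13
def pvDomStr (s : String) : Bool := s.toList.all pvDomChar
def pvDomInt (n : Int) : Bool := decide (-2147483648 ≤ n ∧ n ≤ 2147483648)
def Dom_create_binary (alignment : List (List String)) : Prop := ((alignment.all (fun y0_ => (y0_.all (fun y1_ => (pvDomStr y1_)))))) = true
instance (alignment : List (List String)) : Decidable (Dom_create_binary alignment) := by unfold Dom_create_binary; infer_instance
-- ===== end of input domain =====

-- B truncates each row by one slice deletion instead of A's mutate-while-iterating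
-- pop loop; equivalence is about the RETURN value (in Python both mutate rows identically).

-- ===== PORT A =====
-- A's 'for _ in row: row.pop(0)': Python iterates by index over the shrinking list;
-- each step pops the head and advances the index, stopping when the index reaches len.
def popLoopA (row : List String) (i : Nat) : List String :=
  if i < row.length then popLoopA row.tail (i + 1) else row
termination_by row.length - i
decreasing_by simp_all [List.length_tail]; omega

def create_binary (alignment : List (List String)) : String :=
  PySem.Str.join "" (alignment.foldl (fun tmp row => tmp ++ popLoopA row 0) [])

-- ===== PORT B =====
def create_binary_alt (alignment : List (List String)) : String :=
  PySem.Str.join "" ((alignment.map (fun row => row.drop ((row.length + 1) / 2))).flatten)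

-- ===== PRECONDITION & SPEC =====
def Spec_create_binary (alignment : List (List String)) (out : String) : Prop := out = create_binary_alt alignment
instance (alignment : List (List String)) (out : String) : Decidable (Spec_create_binary alignment out) := by unfold Spec_create_binary; infer_instance

-- ===== CLAIM (what is proved, stated in full; the proofs are below) =====
def Claim_equal_create_binary : Prop := ∀ (alignment : List (List String)), Dom_create_binary alignment → Spec_create_binary alignment (create_binary alignment)

-- ===== LEMMAS AND PROOFS =====
theorem popLoopA_eq (l : List String) : ∀ i, popLoopA l i = l.drop ((l.length - i + 1) / 2) := by
  induction l with
  | nil => intro i; simp [popLoopA]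
  | cons a t ih =>
    intro i
    rw [popLoopA]
    by_cases h : i < (a :: t).length
    · rw [if_pos h, List.tail_cons, ih (i + 1), List.length_cons]
      have h' : i < t.length + 1 := by simpa using h
      have heq : (t.length + 1 - i + 1) / 2 = (t.length - (i + 1) + 1) / 2 + 1 := by omega
      rw [heq, List.drop_succ_cons]
    · rw [if_neg h, List.length_cons]
      have h' : ¬ i < t.length + 1 := by simpa using h
      have heq : (t.length + 1 - i + 1) / 2 = 0 := by omega
      rw [heq, List.drop_zero]

theorem foldl_app (f : List String → List String) :
    ∀ (L : List (List String)) (acc : List String),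
      L.foldl (fun t r => t ++ f r) acc = acc ++ (L.map f).flatten := by
  intro L
  induction L with
  | nil => simp
  | cons r L ih => intro acc; simp [List.foldl_cons, ih]

-- ===== VERDICT (by name: the statement is the Claim_ definition above) =====
theorem create_binary_spec : Claim_equal_create_binary := by
  intro alignment _
  unfold Spec_create_binary create_binary create_binary_alt
  have h : (fun (tmp row : List String) => tmp ++ popLoopA row 0)
      = fun tmp row => tmp ++ row.drop ((row.length + 1) / 2) := by
    funext tmp row
    rw [popLoopA_eq row 0]
    simp
  rw [h, foldl_app (fun row => row.drop ((row.length + 1) / 2)) alignment []]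
  simp
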